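-- pv_equiv track=rewrite | github.com/BrysonGray/slice_reg | slice_reg.py | label_to_turn
-- ===== SOURCE A (Python) =====
-- def label_to_turn(label):
--     label_turn = []
--     first_direction = ''
--     last_direction = ''
--     for l in label:
--         if l not in '1234':
--             label_turn.append(l)
--         else:
--             if first_direction:
--                 # here we compare to last direction
--                 if last_direction == '1':
--                     if l == '1':
--                         label_turn.append('p')
--                     elif l == '2':
--                         label_turn.append('l')
--                     elif l == '3':
--                         label_turn.append('n')
--                     elif l == '4':
--                         label_turn.append('r')
--                 elif last_direction == '2':
--                     if l == '1':
--                         label_turn.append('r')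
--                     elif l == '2':
--                         label_turn.append('p')
--                     elif l == '3':
--                         label_turn.append('l')
--                     elif l == '4':
--                         label_turn.append('n')
--                 elif last_direction == '3':
--                     if l == '1':
--                         label_turn.append('n')
--                     elif l == '2':
--                         label_turn.append('r')
--                     elif l == '3':
--                         label_turn.append('p')
--                     elif l == '4':
--                         label_turn.append('l')
--                 elif last_direction == '4':
--                     if l == '1':
--                         label_turn.append('l')
--                     elif l == '2':
--                         label_turn.append('n')
--                     elif l == '3':
--                         label_turn.append('r')
--                     elif l == '4':
--                         label_turn.append('p')
--
--                 last_direction = l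
--
--             else:
--                 first_direction = l
--                 last_direction = l
--                 label_turn.append(l)
--     return ''.join(label_turn)
-- ===== SOURCE B (Python) =====
-- def label_to_turn(label):
--     dirs = [c for c in label if c in '1234']
--     turns = dirs[:1] + ['plnr'[(ord(b) - ord(a)) % 4] for a, b in zip(dirs, dirs[1:])]
--     it = iter(turns)
--     return ''.join(next(it) if c in '1234' else c for c in label)
-- ===== Notes on version B (the rewrite author's own statement) =====
-- stated objective: alternative
-- what changed: A's stateful single pass (first/last-direction variables feeding a 16-way nested if/elif) is replaced by staged passes: filter out the direction digits, compute the turn code of each consecutive digit pair by a pairwise zip with a closed-form modular turn-code lookup, then substitute the precomputed codes back into the label in one final pass.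
import Mathlib
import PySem

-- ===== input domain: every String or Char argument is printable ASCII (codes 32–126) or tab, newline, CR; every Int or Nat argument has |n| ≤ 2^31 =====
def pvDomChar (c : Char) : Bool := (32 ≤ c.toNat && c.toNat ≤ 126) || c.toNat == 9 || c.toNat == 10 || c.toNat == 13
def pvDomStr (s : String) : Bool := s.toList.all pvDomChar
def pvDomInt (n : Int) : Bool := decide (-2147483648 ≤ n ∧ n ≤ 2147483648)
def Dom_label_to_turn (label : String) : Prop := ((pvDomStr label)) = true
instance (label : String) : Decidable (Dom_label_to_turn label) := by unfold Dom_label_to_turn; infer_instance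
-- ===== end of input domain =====

-- B replaces A's stateful single pass with 16-branch dispatch by staged passes: filter the digits, compute turn codes of consecutive digit pairs via a pairwise zip with a modular turn-code lookup, then substitute them back (objective: alternative).


-- Python's membership test l in '1234' (used verbatim by both sources)
def ltDigit (l : Char) : Bool := "1234".toList.contains l

-- ===== PORT A =====
-- A's 16-way nested if/elif on (last_direction, l); appends nothing if no branch fires.
def ltA_turn (last : String) (l : Char) (acc : List Char) : List Char :=
  if last = "1" then
    if l = '1' then acc ++ ['p'] else if l = '2' then acc ++ ['l']
    else if l = '3' then acc ++ ['n'] else if l = '4' then acc ++ ['r'] else acc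
  else if last = "2" then
    if l = '1' then acc ++ ['r'] else if l = '2' then acc ++ ['p']
    else if l = '3' then acc ++ ['l'] else if l = '4' then acc ++ ['n'] else acc
  else if last = "3" then
    if l = '1' then acc ++ ['n'] else if l = '2' then acc ++ ['r']
    else if l = '3' then acc ++ ['p'] else if l = '4' then acc ++ ['l'] else acc
  else if last = "4" then
    if l = '1' then acc ++ ['l'] else if l = '2' then acc ++ ['n']
    else if l = '3' then acc ++ ['r'] else if l = '4' then acc ++ ['p'] else acc
  else acc

-- A's loop body; state is (label_turn, first_direction, last_direction), branches in A's order.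
def ltA_step (st : List Char × String × String) (l : Char) : List Char × String × String :=
  let (acc, first, last) := st
  if ¬ (ltDigit l) then (acc ++ [l], first, last)
  else
    if first ≠ "" then (ltA_turn last l acc, first, String.singleton l)
    else (acc ++ [l], String.singleton l, String.singleton l)

def label_to_turn (label : String) : String :=
  String.mk (label.toList.foldl ltA_step (([] : List Char), "", "")).1

-- ===== PORT B =====
-- B's closed-form turn code of a consecutive direction pair: 'plnr'[(ord b - ord a) % 4]
def ltB_turn (a b : Char) : Char :=
  "plnr".toList.getD ((PySem.Int.mod ((b.toNat : Int) - (a.toNat : Int)) 4)).toNat 'p'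

-- B's final pass: substitute the next precomputed code for each digit (codes never run out by construction; Python's next() would raise there).
def ltB_subst : List Char → List Char → List Char
  | [], _ => []
  | c :: cs, ts =>
    if ltDigit c then
      match ts with
      | t :: ts' => t :: ltB_subst cs ts'
      | [] => []
    else c :: ltB_subst cs ts

def label_to_turn_alt (label : String) : String :=
  let dirs := label.toList.filter (fun c => ltDigit c)
  let turns := dirs.take 1 ++ (dirs.zip dirs.tail).map (fun p => ltB_turn p.1 p.2)
  String.mk (ltB_subst label.toList turns)

-- ===== PRECONDITION & SPEC =====
def Spec_label_to_turn (label : String) (out : String) : Prop := out = label_to_turn_alt label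
instance (label : String) (out : String) : Decidable (Spec_label_to_turn label out) := by unfold Spec_label_to_turn; infer_instance

-- ===== CLAIM (what is proved, stated in full; the proofs are below) =====
def Claim_equal_label_to_turn : Prop := ∀ (label : String), Dom_label_to_turn label → Spec_label_to_turn label (label_to_turn label)

-- ===== LEMMAS AND PROOFS =====

-- common reference recursion: the output with pending last direction o
def ltSpec : Option Char → List Char → List Char
  | _, [] => []
  | o, l :: cs =>
    if ltDigit l then
      (match o with
       | none => l
       | some c => ltB_turn c l) :: ltSpec (some l) cs
    else l :: ltSpec o cs

theorem ltDigit_cases (l : Char) (h : ltDigit l = true) :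
    l = '1' ∨ l = '2' ∨ l = '3' ∨ l = '4' := by
  simp [ltDigit] at h; tauto

-- on direction chars, A's nested dispatch produces exactly the modular lookup
theorem ltA_turn_eq (c l : Char) (hc : c = '1' ∨ c = '2' ∨ c = '3' ∨ c = '4')
    (hl : l = '1' ∨ l = '2' ∨ l = '3' ∨ l = '4') (acc : List Char) :
    ltA_turn (String.singleton c) l acc = acc ++ [ltB_turn c l] := by
  rcases hc with rfl|rfl|rfl|rfl <;> rcases hl with rfl|rfl|rfl|rfl <;>
    simp [ltA_turn, show (ltB_turn '1' '1' = 'p' ∧ ltB_turn '1' '2' = 'l' ∧ ltB_turn '1' '3' = 'n' ∧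
        ltB_turn '1' '4' = 'r' ∧ ltB_turn '2' '1' = 'r' ∧ ltB_turn '2' '2' = 'p' ∧ ltB_turn '2' '3' = 'l' ∧
        ltB_turn '2' '4' = 'n' ∧ ltB_turn '3' '1' = 'n' ∧ ltB_turn '3' '2' = 'r' ∧ ltB_turn '3' '3' = 'p' ∧
        ltB_turn '3' '4' = 'l' ∧ ltB_turn '4' '1' = 'l' ∧ ltB_turn '4' '2' = 'n' ∧ ltB_turn '4' '3' = 'r' ∧
        ltB_turn '4' '4' = 'p') from by decide,
      show String.singleton '1' = "1" from by decide,
      show String.singleton '2' = "2" from by decide,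
      show String.singleton '3' = "3" from by decide,
      show String.singleton '4' = "4" from by decide]

-- the A-loop states corresponding to pending direction o
def ltInv (first last : String) (o : Option Char) : Prop :=
  (first = "" ∧ o = none) ∨
  ((first ≠ "") ∧ ∃ c, (c = '1' ∨ c = '2' ∨ c = '3' ∨ c = '4') ∧ last = String.singleton c ∧ o = some c)

theorem singleton_ne_empty (l : Char) : String.singleton l ≠ "" := by
  intro h; have := congrArg String.toList h; simp at this

-- A's fold computes ltSpec
theorem ltA_fold_eq (cs : List Char) (acc : List Char) (first last : String) (o : Option Char)
    (h : ltInv first last o) :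
    (cs.foldl ltA_step (acc, first, last)).1 = acc ++ ltSpec o cs := by
  induction cs generalizing acc first last o with
  | nil => simp [ltSpec]
  | cons l cs ih =>
    simp only [List.foldl_cons, ltSpec]
    by_cases hd : ltDigit l = true
    · have hl := ltDigit_cases l hd
      rcases h with ⟨hf, ho⟩ | ⟨hf, c, hc, hlast, ho⟩
      · subst hf ho
        simp only [ltA_step, hd, not_true, reduceIte, ne_eq, ite_true]
        rw [ih _ _ _ _ (Or.inr ⟨singleton_ne_empty l, l, hl, rfl, rfl⟩)]
        simp
      · subst hlast ho
        simp only [ltA_step, hd, not_true, reduceIte, ne_eq, hf, not_false_iff, ite_true]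
        rw [ltA_turn_eq c l hc hl, ih _ _ _ _ (Or.inr ⟨hf, l, hl, rfl, rfl⟩)]
        simp
    · simp only [ltA_step, hd, not_false_iff, reduceIte, ite_false, Bool.false_eq_true]
      rw [ih _ _ _ _ h]
      simp

-- B's pairwise-zip turn list, consumed by the substitution pass, reproduces ltSpec (pending direction c)
theorem ltB_tail (cs : List Char) (c : Char) :
    ltB_subst cs (((c :: cs.filter (fun x => ltDigit x)).zip
        (cs.filter (fun x => ltDigit x))).map (fun q => ltB_turn q.1 q.2))
      = ltSpec (some c) cs := by
  induction cs generalizing c with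
  | nil => simp [ltB_subst, ltSpec]
  | cons l cs ih =>
    by_cases hd : ltDigit l = true
    · simp only [List.filter_cons, hd, ite_true, List.zip_cons_cons, List.map_cons,
        ltB_subst, ltSpec]
      rw [ih]
    · simp only [List.filter_cons, hd, Bool.false_eq_true, ite_false, ltB_subst, ltSpec]
      rw [ih]

-- same for the whole turn list, starting with no pending direction
theorem ltB_main (cs : List Char) :
    ltB_subst cs ((cs.filter (fun x => ltDigit x)).take 1 ++
        ((cs.filter (fun x => ltDigit x)).zip
          (cs.filter (fun x => ltDigit x)).tail).map (fun q => ltB_turn q.1 q.2))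
      = ltSpec none cs := by
  induction cs with
  | nil => simp [ltB_subst, ltSpec]
  | cons l cs ih =>
    by_cases hd : ltDigit l = true
    · simp only [List.filter_cons, hd, ite_true, List.take, List.tail_cons,
        ltB_subst, ltSpec, List.cons_append, List.nil_append]
      rw [ltB_tail]
    · simp only [List.filter_cons, hd, Bool.false_eq_true, ite_false, ltB_subst, ltSpec]
      rw [ih]

-- ===== VERDICT (by name: the statement is the Claim_ definition above) =====
theorem label_to_turn_spec : Claim_equal_label_to_turn := by
  intro label _
  unfold Spec_label_to_turn label_to_turn label_to_turn_alt
  rw [ltA_fold_eq label.toList [] "" "" none (Or.inl ⟨rfl, rfl⟩)]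
  simp only [List.nil_append]
  rw [ltB_main label.toList]
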